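-- pv_equiv track=rewrite | github.com/MIRACLEJACOBPRO/25OS | src/backend/services/ai_decision_agent.py | _optimize_execution_order
-- ===== SOURCE A (Python) =====
-- from typing import Dict, List, Any, Optional, Union, Tuple
--
-- def _optimize_execution_order(commands: List[Dict]) -> List[int]:
--     """优化执行顺序"""
--     # 简单的优先级排序，后续可以实现更复杂的依赖关系分析
--     priority_map = {
--         'stop_attack': 1,
--         'isolate_system': 2,
--         'kill_process': 3,
--         'block_ip': 4,
--         'backup_file': 5,
--         'scan_file': 6,
--         'restart_service': 7,
--         'update_config': 8,
--         'check_status': 9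
--     }
--
--     indexed_commands = [(i, cmd) for i, cmd in enumerate(commands)]
--     indexed_commands.sort(key=lambda x: priority_map.get(x[1].get('action', ''), 10))
--
--     return [i for i, _ in indexed_commands]
-- ===== SOURCE B (Python) =====
-- def _optimize_execution_order(commands):
--     """Bucket emission over the bounded priority range instead of a stable sort."""
--     priority_map = {
--         'stop_attack': 1,
--         'isolate_system': 2,
--         'kill_process': 3,
--         'block_ip': 4,
--         'backup_file': 5,
--         'scan_file': 6,
--         'restart_service': 7,
--         'update_config': 8,
--         'check_status': 9
--     }
--     order = []
--     for p in range(1, 11):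
--         for i, cmd in enumerate(commands):
--             if priority_map.get(cmd.get('action', ''), 10) == p:
--                 order.append(i)
--     return order
-- ===== Notes on version B (the rewrite author's own statement) =====
-- stated objective: alternative
-- what changed: Replaces the enumerate-then-stable-sort pipeline by a bucket (counting-sort style) pass: loop the fixed priority values 1..10 and emit, for each, the indices of commands with that priority in original order, which reproduces the stable ordering without sorting.
import Mathlib
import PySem

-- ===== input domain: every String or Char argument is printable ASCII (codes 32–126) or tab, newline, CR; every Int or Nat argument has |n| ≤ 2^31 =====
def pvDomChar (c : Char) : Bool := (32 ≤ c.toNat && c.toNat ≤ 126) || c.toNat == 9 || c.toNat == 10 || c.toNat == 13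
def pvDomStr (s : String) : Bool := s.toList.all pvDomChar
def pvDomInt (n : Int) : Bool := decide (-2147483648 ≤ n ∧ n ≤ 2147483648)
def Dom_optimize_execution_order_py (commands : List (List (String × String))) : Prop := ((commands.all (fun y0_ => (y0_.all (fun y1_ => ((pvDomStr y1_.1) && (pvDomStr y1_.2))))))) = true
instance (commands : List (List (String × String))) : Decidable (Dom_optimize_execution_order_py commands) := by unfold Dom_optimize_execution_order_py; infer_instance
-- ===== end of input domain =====

-- B replaces the enumerate-then-stable-sort pipeline by bucket emission over the fixed priority range 1..10 (alternative decomposition, same result).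

-- ===== PORT A =====
-- the literal dict priority_map
def pvPriorityMap : PySem.Dict String Int :=
  PySem.Dict.ofList [("stop_attack", 1), ("isolate_system", 2), ("kill_process", 3),
    ("block_ip", 4), ("backup_file", 5), ("scan_file", 6), ("restart_service", 7),
    ("update_config", 8), ("check_status", 9)]

-- priority_map.get(cmd.get('action', ''), 10)  (the sort key / bucket test both Pythons compute)
def pvKey (cmd : List (String × String)) : Int :=
  pvPriorityMap.getD ((PySem.Dict.mk cmd).getD "action" "") 10

def optimize_execution_order_py (commands : List (List (String × String))) : List Int :=
  let indexed_commands := PySem.List.enumerate commands 0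
  let sortedL := PySem.List.sorted indexed_commands (fun x => pvKey x.2) false
  sortedL.map (fun x => x.1)

-- ===== PORT B =====
def optimize_execution_order_py_alt (commands : List (List (String × String))) : List Int :=
  (PySem.List.pyRange 1 11 1).foldl (fun order p =>
    (PySem.List.enumerate commands 0).foldl (fun order2 ic =>
      if pvKey ic.2 == p then order2 ++ [ic.1] else order2) order) []

-- ===== PRECONDITION & SPEC =====
def Spec_optimize_execution_order_py (commands : List (List (String × String))) (out : List Int) : Prop := out = optimize_execution_order_py_alt commands
instance (commands : List (List (String × String))) (out : List Int) : Decidable (Spec_optimize_execution_order_py commands out) := by unfold Spec_optimize_execution_order_py; infer_instance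

-- ===== CLAIM (what is proved, stated in full; the proofs are below) =====
def Claim_equal_optimize_execution_order_py : Prop := ∀ (commands : List (List (String × String))), Dom_optimize_execution_order_py commands → Spec_optimize_execution_order_py commands (optimize_execution_order_py commands)

-- ===== LEMMAS AND PROOFS =====

-- the key is always in 1..10
theorem pvKey_bounds (cmd : List (String × String)) : 1 ≤ pvKey cmd ∧ pvKey cmd ≤ 10 := by
  unfold pvKey pvPriorityMap
  simp only [PySem.Dict.ofList, PySem.Dict.update, List.foldl_cons, List.foldl_nil,
    PySem.Dict.getD_insert, PySem.Dict.getD_empty]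
  split_ifs <;> omega

-- appending-if inner loop is filter-then-map
theorem pv_foldl_filter {α β : Type} (q : α → Bool) (f : α → β) (xs : List α) (acc : List β) :
    xs.foldl (fun a x => if q x then a ++ [f x] else a) acc = acc ++ (xs.filter q).map f := by
  induction xs generalizing acc with
  | nil => simp
  | cons x xs ih => by_cases h : q x <;> simp [h, ih]

theorem pv_insertBy_append_not {α : Type} (before : α → α → Bool) (x : α) (as bs : List α)
    (h : ∀ y ∈ as, before x y = false) :
    PySem.List.insertBy before x (as ++ bs) = as ++ PySem.List.insertBy before x bs := by
  induction as with
  | nil => simp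
  | cons a as ih =>
      have ha := h a (by simp)
      simp [PySem.List.insertBy, ha, ih (fun y hy => h y (by simp [hy]))]

theorem pv_insertBy_all {α : Type} (before : α → α → Bool) (x : α) (bs : List α)
    (h : ∀ y ∈ bs, before x y = true) :
    PySem.List.insertBy before x bs = x :: bs := by
  cases bs with
  | nil => simp [PySem.List.insertBy]
  | cons b bs => simp [PySem.List.insertBy, h b (by simp)]

-- inserting x into a bucket concatenation puts it at the end of its bucket
theorem pv_insertBy_flatMap {α : Type} (key : α → Int) (x : α) (ps : List Int) (F : Int → List α)
    (hps : ps.Pairwise (· < ·)) (hx : key x ∈ ps)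
    (hF : ∀ p ∈ ps, ∀ a ∈ F p, key a = p) :
    PySem.List.insertBy (fun a b => decide (key a < key b)) x (ps.flatMap F)
      = ps.flatMap (fun p => F p ++ if key x == p then [x] else []) := by
  induction ps with
  | nil => simp at hx
  | cons p ps ih =>
      rw [List.flatMap_cons, List.flatMap_cons]
      have hfront : ∀ y ∈ F p, (decide (key x < key y)) = false := by
        intro y hy
        have := hF p (by simp) y hy
        rcases List.mem_cons.mp hx with h | h
        · simp [this, h]
        · have hlt : p < key x := (List.pairwise_cons.mp hps).1 _ h
          simp [this]; omega
      rw [pv_insertBy_append_not _ _ _ _ hfront]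
      rcases List.mem_cons.mp hx with h | h
      · -- key x = p : x goes right after F p
        have hrest : ∀ y ∈ ps.flatMap F, (decide (key x < key y)) = true := by
          intro y hy
          rcases List.mem_flatMap.mp hy with ⟨q, hq, hyq⟩
          have := hF q (by simp [hq]) y hyq
          have hlt : p < q := (List.pairwise_cons.mp hps).1 _ hq
          simp [this]; omega
        rw [pv_insertBy_all _ _ _ hrest]
        have hifs : ps.flatMap (fun q => F q ++ if key x == q then [x] else []) = ps.flatMap F := by
          apply List.flatMap_congr
          intro q hq
          have hlt : p < q := (List.pairwise_cons.mp hps).1 _ hq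
          have : (key x == q) = false := by simp [h]; omega
          simp [this]
        rw [hifs]
        simp [h]
      · -- key x ∈ ps
        have hne : (key x == p) = false := by
          have hlt : p < key x := (List.pairwise_cons.mp hps).1 _ h
          simp; omega
        rw [ih (List.pairwise_cons.mp hps).2 h (fun q hq a ha => hF q (by simp [hq]) a ha)]
        simp [hne]

-- a stable sort with keys in the strictly increasing list ps is the bucket concatenation
theorem pv_sorted_eq_flatMap {α : Type} (key : α → Int) (xs : List α) (ps : List Int)
    (hps : ps.Pairwise (· < ·)) (hk : ∀ x ∈ xs, key x ∈ ps) :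
    PySem.List.sorted xs key false = ps.flatMap (fun p => xs.filter (fun a => key a == p)) := by
  induction xs using List.reverseRecOn with
  | nil => rw [PySem.List.sorted_eq_foldl_insertBy]; simp
  | append_singleton xs x ih =>
      rw [PySem.List.sorted_eq_foldl_insertBy, List.foldl_append, ← PySem.List.sorted_eq_foldl_insertBy]
      simp only [List.foldl_cons, List.foldl_nil]
      rw [ih (fun y hy => hk y (by simp [hy]))]
      rw [pv_insertBy_flatMap key x ps _ hps (hk x (by simp))
        (fun p hp a ha => by simpa using (List.of_mem_filter ha))]
      apply List.flatMap_congr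
      intro p hp
      by_cases hxp : key x = p <;> simp [List.filter_append, hxp]

-- ===== VERDICT (by name: the statement is the Claim_ definition above) =====
theorem optimize_execution_order_py_spec : Claim_equal_optimize_execution_order_py := by
  intro commands _
  unfold Spec_optimize_execution_order_py optimize_execution_order_py optimize_execution_order_py_alt
  have h10 : PySem.List.pyRange 1 11 1 = [1,2,3,4,5,6,7,8,9,10] := by decide
  rw [h10]
  simp only [List.foldl_cons, List.foldl_nil, pv_foldl_filter]
  rw [pv_sorted_eq_flatMap (α := Int × List (String × String)) (fun x => pvKey x.2) _
    [1,2,3,4,5,6,7,8,9,10] (by decide)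
    (fun x _ => by have := pvKey_bounds x.2; simp; omega)]
  simp [List.flatMap_cons]
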